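-- pv_equiv track=rewrite | github.com/ambrosejcarr/seqc | src/seqc/sequence/index.py | _identify_genome_file
-- ===== SOURCE A (Python) =====
-- def _identify_genome_file(files: [str]) -> str:
--     """Identify and return the soft-masked primary assembly file from a list of fasta
--     files. If the primary assembly is not present, default to the top-level file,
--     which should always be present.
--
--     :param files: list of fasta files obtained from the ENSEMBL ftp server
--     :return str: name of the correct genome file"""
--     for f in files:
--         if '.dna_sm.primary_assembly' in f:
--             return f
--     for f in files:
--         if f.endswith('.dna_sm.toplevel.fa.gz'):
--             return f
--     raise FileNotFoundError('could not find the correct fasta file in %r' % files)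
-- ===== SOURCE B (Python) =====
-- def _identify_genome_file(files: [str]) -> str:
--     fallback = None
--     for f in files:
--         if '.dna_sm.primary_assembly' in f:
--             return f
--         if fallback is None and f.endswith('.dna_sm.toplevel.fa.gz'):
--             fallback = f
--     if fallback is not None:
--         return fallback
--     raise FileNotFoundError('could not find the correct fasta file in %r' % files)
-- ===== Notes on version B (the rewrite author's own statement) =====
-- stated objective: alternative
-- what changed: Replaced A's two sequential scans over files with a single pass that returns immediately on a primary-assembly hit and records the first toplevel match in one fallback variable.
import Mathlib
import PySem

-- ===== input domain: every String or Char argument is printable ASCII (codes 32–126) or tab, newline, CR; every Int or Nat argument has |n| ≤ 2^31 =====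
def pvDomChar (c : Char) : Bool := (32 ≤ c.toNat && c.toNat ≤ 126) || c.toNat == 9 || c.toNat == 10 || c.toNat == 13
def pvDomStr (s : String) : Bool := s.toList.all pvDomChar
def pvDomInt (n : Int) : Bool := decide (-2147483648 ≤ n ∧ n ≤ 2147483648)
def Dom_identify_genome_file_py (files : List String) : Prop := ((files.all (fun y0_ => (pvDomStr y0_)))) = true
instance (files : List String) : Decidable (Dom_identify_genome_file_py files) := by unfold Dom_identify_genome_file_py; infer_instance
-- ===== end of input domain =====

-- B changes A's two sequential scans into a single pass with one fallback variable; equivalence is about the return value (A raises FileNotFoundError outside Pre_).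

-- ===== PORT A =====
-- first loop: return first f containing '.dna_sm.primary_assembly'
def pvALoop1 : List String → Option String
  | [] => none
  | f :: rest => if PySem.Str.isIn ".dna_sm.primary_assembly" f then some f else pvALoop1 rest

-- second loop: return first f ending with '.dna_sm.toplevel.fa.gz'
def pvALoop2 : List String → Option String
  | [] => none
  | f :: rest => if PySem.Str.endswith f ".dna_sm.toplevel.fa.gz" then some f else pvALoop2 rest

def identify_genome_file_py (files : List String) : String :=
  match pvALoop1 files with
  | some f => f
  | none =>
    match pvALoop2 files with
    | some f => f
    | none => ""   -- Python raises FileNotFoundError here; excluded by Pre_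

-- ===== PORT B =====
-- single pass: return on primary hit, record first toplevel match as fallback
def pvBScan : List String → Option String → Option String
  | [], fallback => fallback
  | f :: rest, fallback =>
    if PySem.Str.isIn ".dna_sm.primary_assembly" f then some f
    else
      pvBScan rest
        (if fallback.isNone && PySem.Str.endswith f ".dna_sm.toplevel.fa.gz" then some f else fallback)

def identify_genome_file_py_alt (files : List String) : String :=
  match pvBScan files none with
  | some f => f
  | none => ""   -- Python raises FileNotFoundError here; excluded by Pre_

-- ===== PRECONDITION & SPEC =====
-- Pre_ excludes exactly the inputs on which A (and B) raise FileNotFoundError: no file matches either pattern.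
def Pre_identify_genome_file_py (files : List String) : Prop :=
  (files.any (fun f => PySem.Str.isIn ".dna_sm.primary_assembly" f || PySem.Str.endswith f ".dna_sm.toplevel.fa.gz")) = true
instance (files : List String) : Decidable (Pre_identify_genome_file_py files) := by
  unfold Pre_identify_genome_file_py; infer_instance

def pvWitness_identify_genome_file_py : List String := ["x.dna_sm.toplevel.fa.gz"]

def Spec_identify_genome_file_py (files : List String) (out : String) : Prop := out = identify_genome_file_py_alt files
instance (files : List String) (out : String) : Decidable (Spec_identify_genome_file_py files out) := by unfold Spec_identify_genome_file_py; infer_instance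

-- ===== CLAIM (what is proved, stated in full; the proofs are below) =====
def Claim_equal_identify_genome_file_py : Prop := ∀ (files : List String), Dom_identify_genome_file_py files → Pre_identify_genome_file_py files → Spec_identify_genome_file_py files (identify_genome_file_py files)

-- ===== LEMMAS AND PROOFS =====

-- the single pass equals: first primary, else the fallback, else first toplevel
lemma pvBScan_eq (files : List String) : ∀ fallback,
    pvBScan files fallback =
      match pvALoop1 files with
      | some f => some f
      | none => match fallback with
                | some g => some g
                | none => pvALoop2 files := by
  induction files with
  | nil => intro fb; cases fb <;> simp [pvBScan, pvALoop1, pvALoop2]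
  | cons f rest ih =>
    intro fb
    simp only [pvBScan, pvALoop1, pvALoop2]
    by_cases hp : PySem.Str.isIn ".dna_sm.primary_assembly" f = true
    · rw [if_pos hp, if_pos hp]
    · rw [if_neg hp, if_neg hp, ih]
      cases fb with
      | some g => cases hA : pvALoop1 rest <;> simp
      | none =>
        by_cases ht : PySem.Str.endswith f ".dna_sm.toplevel.fa.gz" = true
        · simp only [Option.isNone_none, Bool.true_and, if_pos ht]
        · simp only [Option.isNone_none, Bool.true_and, if_neg ht]

-- ===== VERDICT (by name: the statement is the Claim_ definition above) =====
theorem identify_genome_file_py_spec : Claim_equal_identify_genome_file_py := by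
  intro files _ _
  unfold Spec_identify_genome_file_py identify_genome_file_py identify_genome_file_py_alt
  rw [pvBScan_eq files none]
  cases pvALoop1 files <;> cases pvALoop2 files <;> simp
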